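-- pv_equiv track=rewrite | github.com/mazzyy/Alloy | apps/api/app/agents/coder/tools/patch.py | _find_fuzzy
-- ===== SOURCE A (Python) =====
-- def _normalise(s: str) -> str:
--     """Collapse leading+trailing whitespace for fuzzy matching.
--
--     We keep the *content* intact — only leading indentation and trailing
--     spaces get normalised. This is what rescues LLM diffs that lose a
--     level of indent after Black reformats a file.
--     """
--     return s.strip()
--
-- def _find_fuzzy(lines: list[str], before: list[str]) -> int:
--     """Whitespace-insensitive counterpart of `_find_exact`."""
--     if not before:
--         return -1
--     norm_before = [_normalise(s) for s in before]
--     norm_lines = [_normalise(s) for s in lines]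
--     n, m = len(lines), len(before)
--     first = -1
--     i = 0
--     while i <= n - m:
--         if norm_lines[i : i + m] == norm_before:
--             if first == -1:
--                 first = i
--                 i += 1
--             else:
--                 return -2
--         else:
--             i += 1
--     return first
-- ===== SOURCE B (Python) =====
-- def _normalise(s: str) -> str:
--     return s.strip()
--
-- def _find_fuzzy(lines: list[str], before: list[str]) -> int:
--     """Index every m-line window of the file by its normalized content, then one dict lookup.
--
--     One pass builds a hash index mapping each window to its first position (or -2 once the
--     window has been seen twice); the pattern itself is never compared during the scan.
--     """
--     if not before:
--         return -1
--     m = len(before)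
--     nl = [_normalise(s) for s in lines]
--     index = {}
--     for i in range(len(nl) - m + 1):
--         key = tuple(nl[i:i + m])
--         index[key] = -2 if key in index else i
--     return index.get(tuple(_normalise(s) for s in before), -1)
-- ===== Notes on version B (the rewrite author's own statement) =====
-- stated objective: alternative
-- what changed: A scans positions comparing each window against the pattern with an early-exit second-match return; B never compares against the pattern during the scan: it builds a hash index from every normalized window to its first position (-2 once seen twice) in one pass and answers with a single dict lookup.
import Mathlib
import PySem

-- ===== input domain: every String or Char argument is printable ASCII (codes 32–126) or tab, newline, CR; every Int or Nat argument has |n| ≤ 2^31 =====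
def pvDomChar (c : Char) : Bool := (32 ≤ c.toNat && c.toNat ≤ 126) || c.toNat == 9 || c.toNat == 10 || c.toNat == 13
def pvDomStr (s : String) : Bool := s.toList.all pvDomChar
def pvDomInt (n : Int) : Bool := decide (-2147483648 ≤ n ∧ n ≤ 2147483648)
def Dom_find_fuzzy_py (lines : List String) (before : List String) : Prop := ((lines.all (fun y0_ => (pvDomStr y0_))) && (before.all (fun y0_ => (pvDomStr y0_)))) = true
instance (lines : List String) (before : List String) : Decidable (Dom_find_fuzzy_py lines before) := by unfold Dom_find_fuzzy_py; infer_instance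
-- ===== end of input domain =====

-- B replaces A's sliding-window search (compare each window against the pattern, early
-- -2 on a second hit) by a window index: one pass builds a dict mapping every normalized
-- m-line window to its first position (-2 once a window is seen twice) without ever
-- looking at the pattern, then a single dict lookup answers. Equal return value on all
-- inputs; neither program mutates its arguments.

-- ===== PORT A =====
-- A's while loop: i from 0 while i <= n - m, comparing norm_lines[i:i+m] with norm_before.
def find_fuzzy_pyLoop (nl nb : List String) (n m : Int) (i : Int) (first : Int) : Int :=
  if _h : i ≤ n - m then
    if PySem.List.slice nl (some i) (some (i + m)) = nb then
      if first = -1 then find_fuzzy_pyLoop nl nb n m (i + 1) i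
      else -2
    else find_fuzzy_pyLoop nl nb n m (i + 1) first
  else first
termination_by (n - m + 1 - i).toNat
decreasing_by all_goals omega

def find_fuzzy_py (lines : List String) (before : List String) : Int :=
  if before = [] then -1
  else
    let norm_before := before.map PySem.Str.strip
    let norm_lines := lines.map PySem.Str.strip
    let n : Int := lines.length
    let m : Int := before.length
    find_fuzzy_pyLoop norm_lines norm_before n m 0 (-1)

-- ===== PORT B =====
def find_fuzzy_py_alt (lines : List String) (before : List String) : Int :=
  if before = [] then -1
  else
    let m : Int := before.length
    let nl := lines.map PySem.Str.strip
    let index : PySem.Dict (List String) Int :=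
      (PySem.List.pyRange 0 ((nl.length : Int) - m + 1) 1).foldl
        (fun d i =>
          d.insert (PySem.List.slice nl (some i) (some (i + m)))
            (if d.contains (PySem.List.slice nl (some i) (some (i + m))) then -2 else i))
        PySem.Dict.empty
    index.getD (before.map PySem.Str.strip) (-1)

-- ===== PRECONDITION & SPEC =====
def Spec_find_fuzzy_py (lines : List String) (before : List String) (out : Int) : Prop := out = find_fuzzy_py_alt lines before
instance (lines : List String) (before : List String) (out : Int) : Decidable (Spec_find_fuzzy_py lines before out) := by unfold Spec_find_fuzzy_py; infer_instance

-- ===== CLAIM (what is proved, stated in full; the proofs are below) =====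
def Claim_equal_find_fuzzy_py : Prop := ∀ (lines : List String) (before : List String), Dom_find_fuzzy_py lines before → Spec_find_fuzzy_py lines before (find_fuzzy_py lines before)

-- ===== LEMMAS AND PROOFS =====

-- proof-only: the effect of one scan step on the entry the final lookup reads
def optStep (nl nb : List String) (m : Int) (v : Option Int) (i : Int) : Option Int :=
  if PySem.List.slice nl (some i) (some (i + m)) = nb then some (if v.isSome then -2 else i) else v

-- B's dict fold, observed at the key nb, is the option fold
theorem fold_get? (nl nb : List String) (m : Int) (L : List Int) (d : PySem.Dict (List String) Int) :
    (L.foldl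
        (fun d i =>
          d.insert (PySem.List.slice nl (some i) (some (i + m)))
            (if d.contains (PySem.List.slice nl (some i) (some (i + m))) then -2 else i)) d).get? nb
      = L.foldl (optStep nl nb m) (d.get? nb) := by
  induction L generalizing d with
  | nil => rfl
  | cons i rest ih =>
    simp only [List.foldl_cons]
    rw [ih]
    congr 1
    by_cases h : PySem.List.slice nl (some i) (some (i + m)) = nb
    · rw [optStep, if_pos h, h, PySem.Dict.get?_insert_self,
        PySem.Dict.contains_eq_isSome_get?]
    · rw [optStep, if_neg h, PySem.Dict.get?_insert_of_ne _ _ (fun e => h e.symm)]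

-- once two matches have been recorded, the option fold stays at -2
theorem optFold_absorb (nl nb : List String) (m : Int) (L : List Int) :
    L.foldl (optStep nl nb m) (some (-2)) = some (-2) := by
  induction L with
  | nil => rfl
  | cons i rest ih =>
    have h1 : optStep nl nb m (some (-2)) i = some (-2) := by
      rw [optStep]; split_ifs <;> simp_all
    rw [List.foldl_cons, h1, ih]

-- main invariant: A's loop from index k equals the option fold over the remaining range
theorem loop_eq_fold (nl nb : List String) (n m : Int) (k f : Int) (hk : 0 ≤ k) :
    find_fuzzy_pyLoop nl nb n m k f
      = ((PySem.List.pyRange k (n - m + 1) 1).foldl (optStep nl nb m)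
          (if f = -1 then none else some f)).getD (-1) := by
  induction hT : (n - m + 1 - k).toNat generalizing k f with
  | zero =>
    have hge : n - m + 1 ≤ k := by omega
    rw [find_fuzzy_pyLoop, dif_neg (by omega)]
    have : PySem.List.pyRange k (n - m + 1) 1 = [] := by
      rw [PySem.List.pyRange_one]
      have : (n - m + 1 - k).toNat = 0 := by omega
      simp [this]
    rw [this]
    split_ifs with hf <;> simp [hf]
  | succ t ih =>
    have hlt : k < n - m + 1 := by omega
    rw [PySem.List.pyRange_one_cons hlt, List.foldl_cons]
    rw [find_fuzzy_pyLoop, dif_pos (by omega)]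
    by_cases hP : PySem.List.slice nl (some k) (some (k + m)) = nb
    · by_cases hf : f = -1
      · rw [if_pos hP, if_pos hf]
        have hrec := ih (k + 1) k (by omega) (by omega)
        rw [hrec]
        have hk1 : ¬ (k = -1) := by omega
        rw [if_neg hk1]
        congr 2
        rw [optStep, if_pos hP, if_pos hf]
        simp
      · rw [if_pos hP, if_neg hf]
        have : optStep nl nb m (if f = -1 then none else some f) k = some (-2) := by
          rw [if_neg hf, optStep, if_pos hP]
          simp
        rw [this, optFold_absorb]
        rfl
    · rw [if_neg hP]
      have hstep : optStep nl nb m (if f = -1 then none else some f) k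
          = (if f = -1 then none else some f) := by
        rw [optStep, if_neg hP]
      rw [hstep]
      exact ih (k + 1) f (by omega) (by omega)

-- ===== VERDICT (by name: the statement is the Claim_ definition above) =====
theorem find_fuzzy_py_spec : Claim_equal_find_fuzzy_py := by
  intro lines before _
  unfold Spec_find_fuzzy_py find_fuzzy_py find_fuzzy_py_alt
  by_cases hb : before = []
  · simp [hb]
  · rw [if_neg hb, if_neg hb]
    have hn : (lines.length : Int) = ((lines.map PySem.Str.strip).length : Int) := by simp
    rw [hn, loop_eq_fold _ _ _ _ 0 (-1) le_rfl]
    rw [PySem.Dict.getD_eq_get?_getD, fold_get?]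
    simp [PySem.Dict.get?_empty]
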